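-- pv_equiv track=rewrite | github.com/gerrymandr/benchmarking | old/function_tests.py | canonical_form
-- ===== SOURCE A (Python) =====
-- def canonical_form(vector):
-- #For more on the concept of canonical form, see the top-level ReadMe.
--     wrong = list(vector)
--     seen = set()
--     wrong_order = [d for d in wrong if not (d in seen or seen.add(d))]
--     correct_order = list(range(1, len(wrong_order) + 1))
--     correction_table = dict(zip(wrong_order, correct_order))
--     right = [correction_table[d] for d in wrong]
--     return right
-- ===== SOURCE B (Python) =====
-- def canonical_form(vector):
--     # Per-element closed form: the label of d is the number of distinct values
--     # in the prefix ending at d's first occurrence. No shared mapping table.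
--     return [len(set(vector[:vector.index(d) + 1])) for d in vector]
-- ===== Notes on version B (the rewrite author's own statement) =====
-- stated objective: alternative
-- what changed: Replaces A's staged table construction (seen-set pass, range+zip dict, lookup map) by a per-element closed form: each label is computed independently as the number of distinct values in the prefix up to that element's first occurrence, with no mapping table at all.
import Mathlib
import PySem

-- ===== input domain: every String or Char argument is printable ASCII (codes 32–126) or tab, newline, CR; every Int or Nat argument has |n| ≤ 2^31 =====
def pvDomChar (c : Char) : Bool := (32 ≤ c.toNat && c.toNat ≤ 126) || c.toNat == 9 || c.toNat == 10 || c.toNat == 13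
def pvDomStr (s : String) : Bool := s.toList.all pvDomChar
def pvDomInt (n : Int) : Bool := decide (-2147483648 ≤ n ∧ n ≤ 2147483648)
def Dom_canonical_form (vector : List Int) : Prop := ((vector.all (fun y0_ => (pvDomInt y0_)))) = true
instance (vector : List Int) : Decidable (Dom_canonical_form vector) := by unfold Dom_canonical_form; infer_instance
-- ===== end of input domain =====

-- B replaces A's staged table construction by a per-element closed form (distinct count of
-- the prefix up to the element's first occurrence); same return value, no speed claim.

-- ===== PORT A =====
-- wrong_order = [d for d in wrong if not (d in seen or seen.add(d))] : fold carrying (seen, acc)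
def canonical_form (vector : List Int) : List Int :=
  let wrong := vector
  let p := wrong.foldl
    (fun (p : PySem.Set Int × List Int) d =>
      if PySem.Set.contains p.1 d then p else (PySem.Set.add p.1 d, p.2 ++ [d]))
    (PySem.Set.empty, [])
  let wrong_order := p.2
  let correct_order := PySem.List.pyRange 1 ((wrong_order.length : Int) + 1)
  let correction_table := PySem.Dict.ofList (wrong_order.zip correct_order)
  -- correction_table[d]: every d of wrong is a key of correction_table, so Python's
  -- dict lookup never raises; get?.getD 0 is exact here
  wrong.map (fun d => (correction_table.get? d).getD 0)

-- ===== PORT B =====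
def canonical_form_alt (vector : List Int) : List Int :=
  vector.map (fun d =>
    -- vector.index(d): d is drawn from vector, so .index never raises; getD 0 is exact here
    ((PySem.Set.ofList (PySem.List.slice vector none
      (some (((PySem.List.index? vector d).getD 0 : Int) + 1)))).length : Int))

-- ===== PRECONDITION & SPEC =====
def Spec_canonical_form (vector : List Int) (out : List Int) : Prop := out = canonical_form_alt vector
instance (vector : List Int) (out : List Int) : Decidable (Spec_canonical_form vector out) := by unfold Spec_canonical_form; infer_instance

-- ===== CLAIM (what is proved, stated in full; the proofs are below) =====
def Claim_equal_canonical_form : Prop := ∀ (vector : List Int), Dom_canonical_form vector → Spec_canonical_form vector (canonical_form vector)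

-- ===== LEMMAS AND PROOFS =====

-- common label: element d of v gets 1 + (index of d among first occurrences of v)
def pvLabel (ks : List Int) (d : Int) : Int := (ks.idxOf d : Int) + 1

-- A's seen/acc fold: both components are Set.update of the start
theorem pvA_fold (l : List Int) (s : PySem.Set Int) :
    l.foldl
      (fun (p : PySem.Set Int × List Int) d =>
        if PySem.Set.contains p.1 d then p else (PySem.Set.add p.1 d, p.2 ++ [d]))
      (s, s) = (PySem.Set.update s l, PySem.Set.update s l) := by
  induction l generalizing s with
  | nil => simp [PySem.Set.update]
  | cons d t ih =>
    simp only [List.foldl_cons, PySem.Set.update]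
    by_cases h : d ∈ s
    · have ha : PySem.Set.add s d = s := PySem.Set.add_of_mem h
      simpa [h, ha, PySem.Set.update] using ih s
    · have ha : PySem.Set.add s d = s ++ [d] := PySem.Set.add_of_not_mem h
      simpa [h, ha, PySem.Set.update] using ih (s ++ [d])

-- lookup in the dict built from zip(ks, range(a, a+len(ks))) for nodup ks
theorem pv_zip_get (ks : List Int) (hn : ks.Nodup) (a : Int) (d0 : PySem.Dict Int Int) (d : Int) :
    (d0.update (ks.zip (PySem.List.pyRange a (a + (ks.length : Int))))).get? d =
      if d ∈ ks then some (a + (ks.idxOf d : Int)) else d0.get? d := by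
  induction ks generalizing a d0 with
  | nil => simp [PySem.Dict.update, PySem.List.pyRange]
  | cons k t ih =>
    have hlt : a < a + ((k :: t).length : Int) := by
      simp only [List.length_cons]; push_cast; omega
    rw [PySem.List.pyRange_one_cons hlt]
    have hb : a + ((k :: t).length : Int) = (a + 1) + (t.length : Int) := by
      push_cast [List.length_cons]; ring
    rw [hb]
    simp only [List.zip_cons_cons, PySem.Dict.update, List.foldl_cons]
    have ih' := ih hn.of_cons (a + 1) (d0.insert k a)
    simp only [PySem.Dict.update] at ih'
    rw [ih']
    by_cases hdt : d ∈ t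
    · have hdk : d ≠ k := fun he => (List.nodup_cons.mp hn).1 (he ▸ hdt)
      have hix : (k :: t).idxOf d = t.idxOf d + 1 := by simp [hdk.symm]
      simp [hdt, hdk, hix]
      omega
    · by_cases hdk : d = k
      · subst hdk
        simp [hdt, PySem.Dict.get?_insert_self]
      · simp [hdt, hdk, PySem.Dict.get?_insert_of_ne _ _ (fun h => hdk h)]

-- distinct count of the prefix ending at d's first occurrence = d's first-occurrence rank
theorem pvKey (v : List Int) : ∀ (s : List Int) (d : Int), d ∉ s → d ∈ v →
    (PySem.Set.update s (v.take (v.idxOf d + 1))).length = (PySem.Set.update s v).idxOf d + 1 := by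
  induction v with
  | nil => intro s d _ h; cases h
  | cons a t ih =>
    intro s d hds hdv
    have hupd : ∀ (s' : List Int) (xs : List Int),
        PySem.Set.update s' (a :: xs) = PySem.Set.update (PySem.Set.add s' a) xs := by
      intro s' xs; simp [PySem.Set.update]
    by_cases hda : d = a
    · subst hda
      have ha : PySem.Set.add s d = s ++ [d] := PySem.Set.add_of_not_mem hds
      rw [List.idxOf_cons_self]
      simp only [List.take_succ_cons, List.take_zero, hupd, ha]
      have h1 : PySem.Set.update (s ++ [d]) ([] : List Int) = s ++ [d] := by
        simp [PySem.Set.update]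
      rw [h1]
      rw [PySem.Set.update_eq_append_filter, List.append_assoc, List.idxOf_append]
      simp [hds]
    · have hdt : d ∈ t := by
        rcases hdv with _ | h
        · exact absurd rfl hda
        · assumption
      have hne : a ≠ d := fun h => hda (Eq.symm h)
      have hidx : (a :: t).idxOf d = t.idxOf d + 1 := by
        simp [hne]
      rw [hidx]
      simp only [List.take_succ_cons, hupd]
      have hds' : d ∉ PySem.Set.add s a := by
        rw [PySem.Set.add_eq_ite]
        split_ifs
        · exact hds
        · simp [hds, hda]
      exact ih (PySem.Set.add s a) d hds' hdt

-- both programs compute v.map (pvLabel (Set.ofList v))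
theorem pvA_eq (v : List Int) :
    canonical_form v = v.map (fun d => pvLabel (PySem.Set.ofList v) d) := by
  unfold canonical_form
  simp only []
  rw [show (PySem.Set.empty : PySem.Set Int) = ([] : PySem.Set Int) from rfl]
  rw [pvA_fold v ([] : PySem.Set Int), PySem.Set.update_nil_left]
  apply List.map_congr_left
  intro d hd
  have hmem : d ∈ PySem.Set.ofList v := (PySem.Set.mem_ofList v d).mpr hd
  have hcomm : ((PySem.Set.ofList v).length : Int) + 1 =
      (1 : Int) + ((PySem.Set.ofList v).length : Int) := by omega
  have hz := pv_zip_get (PySem.Set.ofList v) (PySem.Set.nodup_ofList v) 1 PySem.Dict.empty d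
  simp only [PySem.Dict.ofList, hcomm]
  rw [hz]
  simp [hmem, pvLabel]
  omega

theorem pvB_eq (v : List Int) :
    canonical_form_alt v = v.map (fun d => pvLabel (PySem.Set.ofList v) d) := by
  unfold canonical_form_alt
  apply List.map_congr_left
  intro d hd
  obtain ⟨k, hk⟩ := Option.isSome_iff_exists.mp
    ((PySem.List.index?_isSome_iff v d).mpr hd)
  have hkv : v.idxOf d = k := by
    rw [List.idxOf_eq_getD_idxOf?, ← PySem.List.index?_eq_idxOf?, hk]; rfl
  have hidx : (PySem.List.index? v d).getD 0 = v.idxOf d := by rw [hk, hkv]; rfl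
  rw [hidx]
  have hslice : PySem.List.slice v none (some ((v.idxOf d : Int) + 1)) = v.take (v.idxOf d + 1) := by
    have : ((v.idxOf d : Int) + 1) = ((v.idxOf d + 1 : Nat) : Int) := by push_cast; ring
    rw [this, PySem.List.slice_to_natCast]
  rw [hslice]
  have hk := pvKey v [] d (by simp) hd
  rw [PySem.Set.update_nil_left] at hk
  simp only [pvLabel]
  exact_mod_cast hk

-- ===== VERDICT (by name: the statement is the Claim_ definition above) =====
theorem canonical_form_spec : Claim_equal_canonical_form := by
  intro v _
  show canonical_form v = canonical_form_alt v
  rw [pvA_eq, pvB_eq]
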